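-- pv_equiv track=rewrite | github.com/dominikjalowiecki/Programming-Projects | google_foobar/Level 2/bunny_prisioner_locating.py | solution
-- ===== SOURCE A (Python) =====
-- def solution(x, y):
--     target_lvl = x + y - 1
--     first_num = 1
--     lvl = 1
--
--     while lvl < target_lvl:
--         first_num += lvl
--         lvl += 1
--
--     return str(first_num + x - 1)
-- ===== SOURCE B (Python) =====
-- def solution(x, y):
--     # Closed form: level n = x + y - 1 starts with 1 + T(n-1) where T is a triangular number.
--     n = x + y - 1
--     steps = n - 1 if n > 1 else 0
--     return str(1 + steps * (steps + 1) // 2 + x - 1)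
-- ===== Notes on version B (the rewrite author's own statement) =====
-- stated objective: faster
-- what changed: Replaced the O(x+y) while-loop accumulating the level's first ID with a closed-form triangular-number formula.
import Mathlib
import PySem

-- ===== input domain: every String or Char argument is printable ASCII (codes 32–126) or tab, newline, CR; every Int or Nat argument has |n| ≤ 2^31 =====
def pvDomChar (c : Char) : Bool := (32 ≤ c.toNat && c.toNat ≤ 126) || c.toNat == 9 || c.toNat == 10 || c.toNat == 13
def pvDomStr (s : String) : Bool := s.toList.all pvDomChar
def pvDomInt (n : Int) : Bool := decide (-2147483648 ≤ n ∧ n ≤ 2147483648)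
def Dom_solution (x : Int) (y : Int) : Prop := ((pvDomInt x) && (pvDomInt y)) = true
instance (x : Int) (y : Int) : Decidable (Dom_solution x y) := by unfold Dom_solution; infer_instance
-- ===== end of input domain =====

-- B replaces A's O(x+y) while-loop with a closed-form triangular-number formula (measured asymptotically faster).


-- ===== PORT A =====
-- literal port of A's while loop: state (first_num, lvl), runs while lvl < target
def solutionLoop (first_num : Int) (lvl : Int) (target : Int) : Int :=
  if lvl < target then solutionLoop (first_num + lvl) (lvl + 1) target
  else first_num
termination_by (target - lvl).toNat
decreasing_by omega

def solution (x : Int) (y : Int) : String :=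
  let target_lvl := x + y - 1
  PySem.Int.toStr (solutionLoop 1 1 target_lvl + x - 1)

-- ===== PORT B =====
def solution_alt (x : Int) (y : Int) : String :=
  let n := x + y - 1
  let steps := if n > 1 then n - 1 else 0
  PySem.Int.toStr (1 + PySem.Int.floordiv (steps * (steps + 1)) 2 + x - 1)

-- ===== PRECONDITION & SPEC =====
def Spec_solution (x : Int) (y : Int) (out : String) : Prop := out = solution_alt x y
instance (x : Int) (y : Int) (out : String) : Decidable (Spec_solution x y out) := by unfold Spec_solution; infer_instance

-- ===== CLAIM (what is proved, stated in full; the proofs are below) =====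
def Claim_equal_solution : Prop := ∀ (x : Int) (y : Int), Dom_solution x y → Spec_solution x y (solution x y)

-- ===== LEMMAS AND PROOFS =====
-- doubled loop invariant: 2 * loop result, expressed by the number of iterations k
theorem solutionLoop_double (k : Nat) : ∀ (f l : Int),
    2 * solutionLoop f l (l + k) = 2 * f + 2 * k * l + k * (k - 1) := by
  induction k with
  | zero =>
    intro f l
    rw [solutionLoop]
    simp
  | succ k ih =>
    intro f l
    rw [solutionLoop]
    have hlt : l < l + (↑(k + 1) : Int) := by push_cast; omega
    rw [if_pos hlt]
    have : l + (↑(k + 1) : Int) = (l + 1) + (k : Int) := by push_cast; ring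
    rw [this, ih (f + l) (l + 1)]
    push_cast; ring

theorem solutionLoop_stop (f l t : Int) (h : ¬ l < t) : solutionLoop f l t = f := by
  rw [solutionLoop, if_neg h]

-- ===== VERDICT (by name: the statement is the Claim_ definition above) =====
theorem solution_spec : Claim_equal_solution := by
  intro x y _
  show PySem.Int.toStr (solutionLoop 1 1 (x + y - 1) + x - 1) =
    PySem.Int.toStr (1 + PySem.Int.floordiv
      ((if x + y - 1 > 1 then x + y - 1 - 1 else 0) *
       ((if x + y - 1 > 1 then x + y - 1 - 1 else 0) + 1)) 2 + x - 1)
  apply congrArg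
  set t := x + y - 1 with ht
  by_cases h1 : t > 1
  · -- loop runs k = t - 1 times
    obtain ⟨k, hk⟩ : ∃ k : Nat, t = 1 + (k : Int) := ⟨(t - 1).toNat, by omega⟩
    have hloop := solutionLoop_double k 1 1
    rw [if_pos h1]
    have hfd : PySem.Int.floordiv ((t - 1) * (t - 1 + 1)) 2 =
        solutionLoop 1 1 t - 1 := by
      rw [PySem.Int.floordiv_eq_ediv_of_pos (by omega : (0:Int) < 2)]
      have harg : (t - 1) * (t - 1 + 1) = 2 * (solutionLoop 1 1 t - 1) := by
        rw [hk]
        nlinarith [hloop]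
      rw [harg, Int.mul_ediv_cancel_left _ (by omega : (2:Int) ≠ 0)]
    rw [hfd]; ring
  · rw [if_neg h1]
    rw [solutionLoop_stop 1 1 t (by omega)]
    norm_num [PySem.Int.floordiv]
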